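-- pv_equiv track=rewrite | github.com/zpyao1996/leetcode | K Empty Slots.py | kBloomingSlots
-- ===== SOURCE A (Python) =====
-- import bisect
--
-- def kBloomingSlots(flowers, k):
--     start_pos, end_pos, intervals, state_list = \
--         [flowers[0]], [flowers[0]], [1], [k == 1]
--     for pos in flowers[1:]:
--         insert_idx = bisect.bisect(start_pos, pos)
--         if (insert_idx != 0 and pos == end_pos[insert_idx - 1] + 1) and \
--     (insert_idx != len(start_pos) and pos == start_pos[insert_idx] - 1):
--             start_pos.pop(insert_idx)
--             end_pos.pop(insert_idx - 1)
--             intervals[insert_idx - 1] += 1 + intervals[insert_idx]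
--             intervals.pop(insert_idx)
--         elif insert_idx != 0 and pos == end_pos[insert_idx - 1] + 1:
--             end_pos[insert_idx - 1] = pos
--             intervals[insert_idx - 1] += 1
--         elif (insert_idx != len(start_pos) and pos == start_pos[insert_idx] - 1):
--             start_pos[insert_idx] = pos
--             intervals[insert_idx] += 1
--         else:
--             start_pos.insert(insert_idx, pos)
--             end_pos.insert(insert_idx, pos)
--             intervals.insert(insert_idx, 1)
--         state_list.append(k in intervals)
--     days = [idx + 1 for idx, state in enumerate(state_list) if state]
--     if not days:
--         return -1
--     else:
--         return max(days)
-- ===== SOURCE B (Python) =====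
-- def kBloomingSlots(flowers, k):
--     # One pass with a boundary-length map: for each newly bloomed position,
--     # merge with the adjacent runs in O(1) and keep a counter of runs of
--     # length exactly k; the answer is the last day that counter is positive.
--     lengths = {}
--     cnt = 0
--     ans = -1
--     day = 0
--     for pos in flowers:
--         day += 1
--         left = lengths.get(pos - 1, 0)
--         right = lengths.get(pos + 1, 0)
--         if 0 < left == k:
--             cnt -= 1
--         if 0 < right == k:
--             cnt -= 1
--         total = left + 1 + right
--         if total == k:
--             cnt += 1
--         lengths[pos - left] = total
--         lengths[pos + right] = total
--         if cnt > 0: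
--             ans = day
--     return ans
-- ===== Notes on version B (the rewrite author's own statement) =====
-- stated objective: faster
-- what changed: Replaces A's sorted parallel interval lists maintained with bisect/insert/pop (O(n) per flower) by a single pass that merges adjacent runs through a boundary-position->run-length dictionary in O(1) per flower, keeping a counter of runs of length exactly k and the last day that counter was positive. Pre_ excludes the empty list (A raises IndexError) and lists with repeated positions, on which A's overlapping phantom intervals are an accident of its bisect-based bookkeeping (re-blooming a slot is meaningless for this task).
-- outside the precondition, e.g. on kBloomingSlots([5, 6, 5], 2): A returns 3, B returns 2; on kBloomingSlots([], 0): A raises IndexError, B returns -1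
import Mathlib
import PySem

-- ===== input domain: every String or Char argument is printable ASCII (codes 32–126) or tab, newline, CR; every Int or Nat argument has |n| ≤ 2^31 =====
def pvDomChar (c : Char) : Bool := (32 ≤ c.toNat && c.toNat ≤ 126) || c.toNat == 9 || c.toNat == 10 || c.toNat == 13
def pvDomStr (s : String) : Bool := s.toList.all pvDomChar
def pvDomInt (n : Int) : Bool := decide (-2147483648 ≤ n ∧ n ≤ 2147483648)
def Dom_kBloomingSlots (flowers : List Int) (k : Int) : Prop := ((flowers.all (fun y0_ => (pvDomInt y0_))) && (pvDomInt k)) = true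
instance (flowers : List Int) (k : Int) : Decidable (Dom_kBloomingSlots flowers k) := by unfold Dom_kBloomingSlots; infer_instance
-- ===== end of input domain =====

-- B replaces A's sorted interval lists (bisect + list insert/pop, O(n) per flower) by a
-- boundary-length dictionary merging adjacent runs in O(1) per flower (measured faster).


-- ===== PORT A =====
-- One iteration of A's for-loop; state = (start_pos, end_pos, intervals, state_list).
-- bisect.bisect is PySem.List.bisectRight; the guarded list indices ep[idx-1], sp[idx]
-- are in range whenever Python evaluates them, so getD is exact there.
def stepA (k : Int) (st : List Int × List Int × List Int × List Bool) (pos : Int) :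
    List Int × List Int × List Int × List Bool :=
  let sp := st.1; let ep := st.2.1; let iv := st.2.2.1; let sl := st.2.2.2
  let idx := PySem.List.bisectRight sp pos
  let s3 :=
    if (idx ≠ 0 ∧ pos = ep.getD (idx - 1) 0 + 1) ∧ (idx ≠ sp.length ∧ pos = sp.getD idx 0 - 1) then
      (sp.eraseIdx idx, ep.eraseIdx (idx - 1),
        (iv.set (idx - 1) (iv.getD (idx - 1) 0 + 1 + iv.getD idx 0)).eraseIdx idx)
    else if idx ≠ 0 ∧ pos = ep.getD (idx - 1) 0 + 1 then
      (sp, ep.set (idx - 1) pos, iv.set (idx - 1) (iv.getD (idx - 1) 0 + 1))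
    else if idx ≠ sp.length ∧ pos = sp.getD idx 0 - 1 then
      (sp.set idx pos, ep, iv.set idx (iv.getD idx 0 + 1))
    else
      (sp.insertIdx idx pos, ep.insertIdx idx pos, iv.insertIdx idx 1)
  (s3.1, s3.2.1, s3.2.2, sl ++ [s3.2.2.contains k])

-- Python raises IndexError on flowers[0] for the empty list; that input is excluded by Pre_.
def kBloomingSlots (flowers : List Int) (k : Int) : Int :=
  match flowers with
  | [] => -1
  | f0 :: rest =>
    let st := rest.foldl (stepA k) ([f0], [f0], [1], [k == 1])
    let days := ((PySem.List.enumerate st.2.2.2).filter (fun p => p.2)).map (fun p => p.1 + 1)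
    match PySem.List.max? days (fun x => x) with
    | none => -1
    | some d => d


-- ===== PORT B =====
-- One iteration of B's loop; state = (lengths, cnt, ans, day).
def stepB (k : Int) (st : PySem.Dict Int Int × Int × Int × Int) (pos : Int) :
    PySem.Dict Int Int × Int × Int × Int :=
  let lens := st.1; let cnt := st.2.1; let ans := st.2.2.1; let day := st.2.2.2 + 1
  let left := lens.getD (pos - 1) 0
  let right := lens.getD (pos + 1) 0
  let cnt := if 0 < left ∧ left = k then cnt - 1 else cnt
  let cnt := if 0 < right ∧ right = k then cnt - 1 else cnt
  let total := left + 1 + right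
  let cnt := if total = k then cnt + 1 else cnt
  let lens := (lens.insert (pos - left) total).insert (pos + right) total
  let ans := if cnt > 0 then day else ans
  (lens, cnt, ans, day)

def kBloomingSlots_alt (flowers : List Int) (k : Int) : Int :=
  (flowers.foldl (stepB k) (PySem.Dict.empty, 0, -1, 0)).2.2.1


-- ===== PRECONDITION & SPEC =====
-- Pre_ excludes the empty list (A raises IndexError on flowers[0]) and lists with repeated
-- positions, on which A's overlapping phantom intervals are an accident of its bisect-based
-- bookkeeping (re-blooming an already bloomed slot is meaningless for this task).
def Pre_kBloomingSlots (flowers : List Int) (k : Int) : Prop :=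
  flowers ≠ [] ∧ flowers.Nodup
instance (flowers : List Int) (k : Int) : Decidable (Pre_kBloomingSlots flowers k) := by
  unfold Pre_kBloomingSlots; infer_instance
def pvWitness_kBloomingSlots : List Int × Int := ([1, 3, 2], 2)

def Spec_kBloomingSlots (flowers : List Int) (k : Int) (out : Int) : Prop := out = kBloomingSlots_alt flowers k
instance (flowers : List Int) (k : Int) (out : Int) : Decidable (Spec_kBloomingSlots flowers k out) := by unfold Spec_kBloomingSlots; infer_instance

-- ===== CLAIM (what is proved, stated in full; the proofs are below) =====
def Claim_equal_kBloomingSlots : Prop := ∀ (flowers : List Int) (k : Int), Dom_kBloomingSlots flowers k → Pre_kBloomingSlots flowers k → Spec_kBloomingSlots flowers k (kBloomingSlots flowers k)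

-- ===== LEMMAS AND PROOFS =====

def runLen (p : Int × Int) : Int := p.2 - p.1 + 1

def RInv (k : Int) (done : List Int) (R : List (Int × Int))
    (lens : PySem.Dict Int Int) (cnt : Int) : Prop :=
  (∀ p ∈ R, p.1 ≤ p.2) ∧
  R.Pairwise (fun p q => p.2 + 1 < q.1) ∧
  (∀ x : Int, x ∈ done ↔ ∃ p ∈ R, p.1 ≤ x ∧ x ≤ p.2) ∧
  (∀ key : Int, lens.contains key = true → key ∈ done) ∧
  (∀ p ∈ R, lens.get? p.1 = some (runLen p) ∧ lens.get? p.2 = some (runLen p)) ∧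
  cnt = ((R.map runLen).count k : Int)

theorem erase_mid (l1 l2 : List Int) (x : Int) : (l1 ++ x :: l2).eraseIdx l1.length = l1 ++ l2 := by
  induction l1 with
  | nil => rfl
  | cons a t ih => simp [ih]
theorem set_mid (l1 l2 : List Int) (x v : Int) : (l1 ++ x :: l2).set l1.length v = l1 ++ v :: l2 := by
  induction l1 with
  | nil => rfl
  | cons a t ih => simp [ih]
theorem insert_mid (l1 l2 : List Int) (v : Int) : (l1 ++ l2).insertIdx l1.length v = l1 ++ v :: l2 := by
  induction l1 with
  | nil => rfl
  | cons a t ih => simp [List.insertIdx_succ_cons, ih]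
theorem getD_mid (l1 l2 : List Int) (x : Int) : (l1 ++ x :: l2).getD l1.length 0 = x := by
  induction l1 with
  | nil => rfl
  | cons a t ih => simpa using ih

theorem contains_eq_decide_pos (l : List Int) (k : Int) :
    l.contains k = decide (0 < ((l.count k : Int))) := by
  by_cases hm : k ∈ l
  · have h1 : l.contains k = true := by simpa using hm
    have h2 := List.count_pos_iff.mpr hm
    rw [h1, eq_comm, decide_eq_true_iff]
    push_cast; omega
  · have h1 : l.contains k = false := by simpa using hm
    have h2 : l.count k = 0 := List.count_eq_zero.mpr hm
    rw [h1, h2, eq_comm]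
    simp

lemma step_sim (k pos : Int) (done : List Int) (R : List (Int × Int))
    (lens : PySem.Dict Int Int) (cnt ans day : Int) (sl : List Bool)
    (hInv : RInv k done R lens cnt) (hpos : pos ∉ done) :
    ∃ R' lens' cnt',
      stepA k (R.map Prod.fst, R.map Prod.snd, R.map runLen, sl) pos
        = (R'.map Prod.fst, R'.map Prod.snd, R'.map runLen,
            sl ++ [(R'.map runLen).contains k]) ∧
      stepB k (lens, cnt, ans, day) pos
        = (lens', cnt', (if 0 < cnt' then day + 1 else ans), day + 1) ∧
      RInv k (done ++ [pos]) R' lens' cnt' ∧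
      (R'.map runLen).contains k = decide (0 < cnt') := by
  obtain ⟨hle, hpair, hmem, hkeys, hbound, hcnt⟩ := hInv
  set sp := R.map Prod.fst with hsp
  set idx := PySem.List.bisectRight sp pos with hidx
  have hsplen : sp.length = R.length := by simp [hsp]
  have hsorted : sp.Pairwise (· ≤ ·) := by
    rw [hsp, List.pairwise_map]
    refine hpair.imp_of_mem ?_
    intro a b ha hb h
    have := hle a ha
    omega
  obtain ⟨hidxle, hlt_le, hge_gt⟩ := PySem.List.bisectRight_spec sp pos hsorted
  rw [hsplen] at hidxle
  set RL := R.take idx with hRLdef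
  set RR := R.drop idx with hRRdef
  have hsplit : RL ++ RR = R := List.take_append_drop idx R
  have hlenRL : RL.length = idx := by
    rw [hRLdef, List.length_take]; omega
  have hRWL : ∀ p ∈ RL, p.1 < pos := by
    intro p hp
    obtain ⟨j, hj, hget⟩ := List.mem_iff_getElem.mp hp
    have hjidx : j < idx := by simpa [hlenRL] using hj
    have hjR : j < R.length := by
      rw [hRLdef, List.length_take] at hj; omega
    have hgR : R[j]'hjR = p := by
      simpa [hRLdef, List.getElem_take] using hget
    have h1 : sp[j]'(by omega) = p.1 := by
      simp [hsp, hgR]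
    have h2 := hlt_le j (by omega) (by rw [← hidx]; omega)
    rw [h1] at h2
    have hmemR : p ∈ R := List.mem_of_mem_take hp
    have hne : p.1 ≠ pos := by
      intro he
      exact hpos ((hmem pos).mpr ⟨p, hmemR, by omega, by have := hle p hmemR; omega⟩)
    omega
  have hRRgt : ∀ p ∈ RR, pos < p.1 := by
    intro p hp
    obtain ⟨j, hj, hget⟩ := List.mem_iff_getElem.mp hp
    have hjR : idx + j < R.length := by
      rw [hRRdef, List.length_drop] at hj; omega
    have hgR : R[idx + j]'hjR = p := by
      simpa [hRRdef, List.getElem_drop] using hget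
    have h1 : sp[idx + j]'(by omega) = p.1 := by
      simp [hsp, hgR]
    have h2 := hge_gt (idx + j) (by omega) (by rw [← hidx]; omega)
    rw [h1] at h2
    exact h2
  have hpairRL : RL.Pairwise (fun p q => p.2 + 1 < q.1) := hpair.sublist (hRLdef ▸ List.take_sublist idx R)
  have hpairRR : RR.Pairwise (fun p q => p.2 + 1 < q.1) := hpair.sublist (hRRdef ▸ List.drop_sublist idx R)
  have hmemRL : ∀ p ∈ RL, p ∈ R := fun p hp => List.mem_of_mem_take hp
  have hmemRR : ∀ p ∈ RR, p ∈ R := fun p hp => List.mem_of_mem_drop hp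
  have hLex : pos - 1 ∈ done → ∃ RL₀ s₀, RL = RL₀ ++ [(s₀, pos - 1)] ∧ s₀ ≤ pos - 1 := by
    intro h
    obtain ⟨p, hpR, h1, h2⟩ := (hmem _).mp h
    have hlep := hle p hpR
    have hp2 : p.2 = pos - 1 := by
      by_contra hne
      exact hpos ((hmem pos).mpr ⟨p, hpR, by omega, by omega⟩)
    have hpRL : p ∈ RL := by
      have : p ∈ RL ++ RR := hsplit.symm ▸ hpR
      rcases List.mem_append.mp this with h' | h'
      · exact h'
      · have := hRRgt p h'
        omega
    have hne : RL ≠ [] := List.ne_nil_of_mem hpRL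
    have hdecomp : RL.dropLast ++ [RL.getLast hne] = RL := List.dropLast_append_getLast hne
    have hpq : p = RL.getLast hne := by
      by_contra hnepq
      have hpdrop : p ∈ RL.dropLast := by
        have h' : p ∈ RL.dropLast ++ [RL.getLast hne] := by rw [hdecomp]; exact hpRL
        rcases List.mem_append.mp h' with h'' | h''
        · exact h''
        · exact absurd (List.mem_singleton.mp h'') hnepq
      have hPW := hpairRL
      rw [← hdecomp, List.pairwise_append] at hPW
      have hrel := hPW.2.2 p hpdrop (RL.getLast hne) (by simp)
      have := hRWL (RL.getLast hne) (List.getLast_mem hne)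
      omega
    refine ⟨RL.dropLast, p.1, ?_, by omega⟩
    conv_lhs => rw [← hdecomp]
    rw [← hpq, ← hp2]
  have hRex : pos + 1 ∈ done → ∃ e₁ RR₁, RR = (pos + 1, e₁) :: RR₁ ∧ pos + 1 ≤ e₁ := by
    intro h
    obtain ⟨p, hpR, h1, h2⟩ := (hmem _).mp h
    have hlep := hle p hpR
    have hp1 : p.1 = pos + 1 := by
      by_contra hne
      exact hpos ((hmem pos).mpr ⟨p, hpR, by omega, by omega⟩)
    have hpRR : p ∈ RR := by
      have : p ∈ RL ++ RR := hsplit.symm ▸ hpR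
      rcases List.mem_append.mp this with h' | h'
      · have := hRWL p h'
        omega
      · exact h'
    have hne : RR ≠ [] := List.ne_nil_of_mem hpRR
    obtain ⟨q, RR₁, hq⟩ := List.exists_cons_of_ne_nil hne
    have hpq : p = q := by
      by_contra hnepq
      have hpdrop : p ∈ RR₁ := by
        rcases List.mem_cons.mp (show p ∈ q :: RR₁ by rw [← hq]; exact hpRR) with h'' | h''
        · exact absurd h'' hnepq
        · exact h''
      have hPW := hpairRR
      rw [hq, List.pairwise_cons] at hPW
      have hrel := hPW.1 p hpdrop
      have hqR := hRRgt q (hq ▸ List.mem_cons_self ..)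
      have hleq := hle q (hmemRR q (hq ▸ List.mem_cons_self ..))
      omega
    refine ⟨p.2, RR₁, ?_, by omega⟩
    rw [hq, ← hpq, ← hp1]
  have hRRne_of : idx ≠ (R.map Prod.fst).length → RR ≠ [] := by
    intro h hnil
    have h1 : RL.length + RR.length = R.length := by
      rw [← hsplit]; simp
    rw [hnil] at h1
    simp at h1
    rw [List.length_map] at h
    omega
  have hGL : pos - 1 ∉ done → ¬(idx ≠ 0 ∧ pos = (R.map Prod.snd).getD (idx - 1) 0 + 1) := by
    rintro hnL ⟨h0, heq⟩
    have hne : RL ≠ [] := by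
      intro h; rw [h] at hlenRL; simp at hlenRL; omega
    set q := RL.getLast hne with hq
    have hdecomp : RL.dropLast ++ [q] = RL := List.dropLast_append_getLast hne
    have hqR : q ∈ R := hmemRL q (List.getLast_mem hne)
    have hgd : (R.map Prod.snd).getD (idx - 1) 0 = q.2 := by
      have hdec : R.map Prod.snd = RL.dropLast.map Prod.snd ++ q.2 :: RR.map Prod.snd := by
        rw [← hsplit, ← hdecomp]; simp
      rw [hdec, show idx - 1 = (RL.dropLast.map Prod.snd).length by
        simp [List.length_dropLast]; omega, getD_mid]
    rw [hgd] at heq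
    exact hnL ((hmem _).mpr ⟨q, hqR, by have := hle q hqR; omega, by omega⟩)
  have hGR : pos + 1 ∉ done → ¬(idx ≠ (R.map Prod.fst).length ∧ pos = (R.map Prod.fst).getD idx 0 - 1) := by
    rintro hnR ⟨h0, heq⟩
    have hne : RR ≠ [] := hRRne_of h0
    obtain ⟨q, RR₁, hq⟩ := List.exists_cons_of_ne_nil hne
    have hqR : q ∈ R := hmemRR q (by rw [hq]; simp)
    have hgd : (R.map Prod.fst).getD idx 0 = q.1 := by
      have hdec : R.map Prod.fst = RL.map Prod.fst ++ q.1 :: RR₁.map Prod.fst := by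
        rw [← hsplit, hq]; simp
      rw [hdec, show idx = (RL.map Prod.fst).length by simp [hlenRL], getD_mid]
    rw [hgd] at heq
    exact hnR ((hmem _).mpr ⟨q, hqR, by omega, by have := hle q hqR; omega⟩)
  have hb1 : pos + 1 ∉ done → ∀ b ∈ RR, pos + 1 < b.1 := by
    intro hnR b hb
    have h1 := hRRgt b hb
    have h2 : b.1 ≠ pos + 1 := by
      intro he
      exact hnR ((hmem _).mpr ⟨b, hmemRR b hb, by omega, by have := hle b (hmemRR b hb); omega⟩)
    omega
  have ha2 : pos - 1 ∉ done → ∀ a ∈ RL, a.2 + 1 < pos := by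
    intro hnL a ha
    have h1 := hRWL a ha
    have hla := hle a (hmemRL a ha)
    have h2 : a.2 < pos := by
      by_contra h
      exact hpos ((hmem _).mpr ⟨a, hmemRL a ha, by omega, by omega⟩)
    have h3 : a.2 ≠ pos - 1 := by
      intro he
      exact hnL ((hmem _).mpr ⟨a, hmemRL a ha, by omega, by omega⟩)
    omega
  by_cases hL : pos - 1 ∈ done <;> by_cases hR : pos + 1 ∈ done
  · -- merge with both neighbours
    obtain ⟨RL₀, s₀, hRLeq, hs₀⟩ := hLex hL
    obtain ⟨e₁, RR₁, hRReq, he₁⟩ := hRex hR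
    have hRdec : R = RL₀ ++ (s₀, pos - 1) :: (pos + 1, e₁) :: RR₁ := by
      rw [← hsplit, hRLeq, hRReq]; simp
    have hidx0 : RL₀.length + 1 = idx := by
      rw [← hlenRL, hRLeq]; simp
    -- pairwise pieces
    have hpair' := hpair
    rw [hRdec, List.pairwise_append, List.pairwise_cons, List.pairwise_cons] at hpair'
    obtain ⟨hP0, ⟨h1all, h2all, hP1⟩, hcross⟩ := hpair'
    have hcross1 : ∀ a ∈ RL₀, a.2 + 1 < s₀ := fun a ha => by
      simpa using hcross a ha (s₀, pos - 1) (by simp)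
    have hcrossb : ∀ a ∈ RL₀, ∀ b ∈ RR₁, a.2 + 1 < b.1 := fun a ha b hb => by
      simpa using hcross a ha b (by simp [hb])
    have hrel1b' : ∀ b ∈ RR₁, e₁ + 1 < b.1 := fun b hb => by simpa using h2all b hb
    have h1b' : ∀ b ∈ RR₁, pos < b.1 := fun b hb => by
      have := h1all b (by simp [hb]); have := hrel1b' b hb; omega
    have hmid1 : (s₀, pos - 1) ∈ R := by rw [hRdec]; simp
    have hmid2 : (pos + 1, e₁) ∈ R := by rw [hRdec]; simp
    have hRL₀R : ∀ p ∈ RL₀, p ∈ R := fun p hp => by rw [hRdec]; simp [hp]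
    have hRR₁R : ∀ p ∈ RR₁, p ∈ R := fun p hp => by rw [hRdec]; simp [hp]
    have hg2 : (R.map Prod.snd).getD (idx - 1) 0 = pos - 1 := by
      have hdec : R.map Prod.snd = RL₀.map Prod.snd ++ (pos - 1) :: e₁ :: RR₁.map Prod.snd := by
        rw [hRdec]; simp
      rw [hdec, show idx - 1 = (RL₀.map Prod.snd).length by simp; omega, getD_mid]
    have hg4 : (R.map Prod.fst).getD idx 0 = pos + 1 := by
      have hdec : R.map Prod.fst = (RL₀.map Prod.fst ++ [s₀]) ++ (pos + 1) :: RR₁.map Prod.fst := by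
        rw [hRdec]; simp
      rw [hdec, show idx = (RL₀.map Prod.fst ++ [s₀]).length by simp; omega, getD_mid]
    have hg3 : idx ≠ (R.map Prod.fst).length := by
      rw [hRdec]; simp; omega
    have hsp' : (R.map Prod.fst).eraseIdx idx = (RL₀ ++ (s₀, e₁) :: RR₁).map Prod.fst := by
      have hdec : R.map Prod.fst = (RL₀.map Prod.fst ++ [s₀]) ++ (pos + 1) :: RR₁.map Prod.fst := by
        rw [hRdec]; simp
      rw [hdec, show idx = (RL₀.map Prod.fst ++ [s₀]).length by simp; omega, erase_mid]
      simp
    have hep' : (R.map Prod.snd).eraseIdx (idx - 1) = (RL₀ ++ (s₀, e₁) :: RR₁).map Prod.snd := by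
      have hdec : R.map Prod.snd = RL₀.map Prod.snd ++ (pos - 1) :: e₁ :: RR₁.map Prod.snd := by
        rw [hRdec]; simp
      rw [hdec, show idx - 1 = (RL₀.map Prod.snd).length by simp; omega, erase_mid]
      simp
    have hiva : (R.map runLen).getD (idx - 1) 0 = pos - s₀ := by
      have hdec : R.map runLen = RL₀.map runLen ++ (pos - s₀) :: (e₁ - pos) :: RR₁.map runLen := by
        rw [hRdec]; simp [runLen]; constructor <;> ring
      rw [hdec, show idx - 1 = (RL₀.map runLen).length by simp; omega, getD_mid]
    have hivb : (R.map runLen).getD idx 0 = e₁ - pos := by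
      have hdec : R.map runLen = (RL₀.map runLen ++ [pos - s₀]) ++ (e₁ - pos) :: RR₁.map runLen := by
        rw [hRdec]; simp [runLen]; constructor <;> ring
      rw [hdec, show idx = (RL₀.map runLen ++ [pos - s₀]).length by simp; omega, getD_mid]
    have hiv' : ((R.map runLen).set (idx - 1) ((R.map runLen).getD (idx - 1) 0 + 1 + (R.map runLen).getD idx 0)).eraseIdx idx
        = (RL₀ ++ (s₀, e₁) :: RR₁).map runLen := by
      rw [hiva, hivb]
      have hdec : R.map runLen = RL₀.map runLen ++ (pos - s₀) :: (e₁ - pos) :: RR₁.map runLen := by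
        rw [hRdec]; simp [runLen]; constructor <;> ring
      rw [hdec, show idx - 1 = (RL₀.map runLen).length by simp; omega, set_mid]
      rw [show (RL₀.map runLen) ++ (pos - s₀ + 1 + (e₁ - pos)) :: (e₁ - pos) :: RR₁.map runLen
            = ((RL₀.map runLen) ++ [pos - s₀ + 1 + (e₁ - pos)]) ++ (e₁ - pos) :: RR₁.map runLen by simp]
      rw [show idx = ((RL₀.map runLen) ++ [pos - s₀ + 1 + (e₁ - pos)]).length by simp; omega, erase_mid]
      simp [runLen]
      ring
    have hgetL : lens.getD (pos - 1) 0 = pos - s₀ := by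
      have h := (hbound _ hmid1).2
      simp only [runLen] at h
      rw [PySem.Dict.getD_eq_get?_getD, h]
      simp; ring
    have hgetR : lens.getD (pos + 1) 0 = e₁ - pos := by
      have h := (hbound _ hmid2).1
      simp only [runLen] at h
      rw [PySem.Dict.getD_eq_get?_getD, h]
      simp; ring
    have hcnt6 : (if e₁ - s₀ + 1 = k then
        (if 0 < e₁ - pos ∧ e₁ - pos = k then (if 0 < pos - s₀ ∧ pos - s₀ = k then cnt - 1 else cnt) - 1
         else (if 0 < pos - s₀ ∧ pos - s₀ = k then cnt - 1 else cnt)) + 1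
       else (if 0 < e₁ - pos ∧ e₁ - pos = k then (if 0 < pos - s₀ ∧ pos - s₀ = k then cnt - 1 else cnt) - 1
         else (if 0 < pos - s₀ ∧ pos - s₀ = k then cnt - 1 else cnt)))
        = (((RL₀ ++ (s₀, e₁) :: RR₁).map runLen).count k : Int) := by
      rw [hcnt, hRdec]
      simp only [List.map_append, List.map_cons, List.count_append, List.count_cons, beq_iff_eq, runLen]
      push_cast
      split_ifs <;> omega
    refine ⟨RL₀ ++ (s₀, e₁) :: RR₁,
      (lens.insert s₀ (e₁ - s₀ + 1)).insert e₁ (e₁ - s₀ + 1),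
      (if e₁ - s₀ + 1 = k then
        (if 0 < e₁ - pos ∧ e₁ - pos = k then (if 0 < pos - s₀ ∧ pos - s₀ = k then cnt - 1 else cnt) - 1
         else (if 0 < pos - s₀ ∧ pos - s₀ = k then cnt - 1 else cnt)) + 1
       else (if 0 < e₁ - pos ∧ e₁ - pos = k then (if 0 < pos - s₀ ∧ pos - s₀ = k then cnt - 1 else cnt) - 1
         else (if 0 < pos - s₀ ∧ pos - s₀ = k then cnt - 1 else cnt))), ?_, ?_, ?_, ?_⟩
    case _ =>
      simp only [stepA]
      rw [← hidx]
      rw [if_pos ⟨⟨by omega, by rw [hg2]; ring⟩, ⟨hg3, by rw [hg4]; ring⟩⟩]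
      rw [hsp', hep', hiv']
    case _ =>
      simp only [stepB]
      rw [hgetL, hgetR]
      rw [show pos - (pos - s₀) = s₀ by ring, show pos + (e₁ - pos) = e₁ by ring,
          show pos - s₀ + 1 + (e₁ - pos) = e₁ - s₀ + 1 by ring]
    case _ =>
      refine ⟨?_, ?_, ?_, ?_, ?_, hcnt6⟩
      · intro p hp
        rcases List.mem_append.mp hp with hp | hp
        · exact hle p (hRL₀R p hp)
        · rcases List.mem_cons.mp hp with rfl | hp
          · simp; omega
          · exact hle p (hRR₁R p hp)
      · rw [List.pairwise_append, List.pairwise_cons]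
        refine ⟨hP0, ⟨fun b hb => by simpa using hrel1b' b hb, hP1⟩, ?_⟩
        intro a ha b hb
        rcases List.mem_cons.mp hb with rfl | hb
        · simpa using hcross1 a ha
        · exact hcrossb a ha b hb
      · intro x
        rw [List.mem_append, List.mem_singleton, hmem x, hRdec]
        constructor
        · rintro (⟨p, hp, hx1, hx2⟩ | hxp)
          · rcases List.mem_append.mp hp with hp | hp
            · exact ⟨p, by simp [hp], hx1, hx2⟩
            · rcases List.mem_cons.mp hp with rfl | hp
              · exact ⟨(s₀, e₁), by simp, by simpa using hx1, by simp at hx2 ⊢; omega⟩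
              · rcases List.mem_cons.mp hp with rfl | hp
                · exact ⟨(s₀, e₁), by simp, by simp at hx1 ⊢; omega, by simpa using hx2⟩
                · exact ⟨p, by simp [hp], hx1, hx2⟩
          · subst hxp
            exact ⟨(s₀, e₁), by simp, by simp; omega, by simp; omega⟩
        · rintro ⟨p, hp, hx1, hx2⟩
          rcases List.mem_append.mp hp with hp | hp
          · exact Or.inl ⟨p, by simp [hp], hx1, hx2⟩
          · rcases List.mem_cons.mp hp with rfl | hp
            · simp only at hx1 hx2
              by_cases hxe : x = pos
              · exact Or.inr hxe
              · by_cases hxlt : x ≤ pos - 1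
                · exact Or.inl ⟨(s₀, pos - 1), by simp, by simpa using hx1, by simp; omega⟩
                · exact Or.inl ⟨(pos + 1, e₁), by simp, by simp; omega, by simpa using hx2⟩
            · exact Or.inl ⟨p, by simp [hp], hx1, hx2⟩
      · intro key hk
        simp only [PySem.Dict.contains_insert, Bool.or_eq_true, beq_iff_eq] at hk
        rcases hk with hk1 | hk1 | hk
        · exact List.mem_append_left _ ((hmem _).mpr ⟨(pos + 1, e₁), hmid2, by simp [hk1]; omega, by simp [hk1]⟩)
        · exact List.mem_append_left _ ((hmem _).mpr ⟨(s₀, pos - 1), hmid1, by simp [hk1], by simp [hk1]; omega⟩)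
        · exact List.mem_append_left _ (hkeys _ hk)
      · have hget' : ∀ x : Int, ((lens.insert s₀ (e₁ - s₀ + 1)).insert e₁ (e₁ - s₀ + 1)).get? x
            = if x = e₁ then some (e₁ - s₀ + 1) else if x = s₀ then some (e₁ - s₀ + 1) else lens.get? x := by
          intro x
          rw [PySem.Dict.get?_insert, PySem.Dict.get?_insert]
        intro p hp
        rcases List.mem_append.mp hp with hp | hp
        · have h1 := hcross1 p hp
          have h2 := hle p (hRL₀R p hp)
          rw [hget', hget']
          rw [if_neg (by omega), if_neg (by omega), if_neg (by omega), if_neg (by omega)]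
          exact hbound p (hRL₀R p hp)
        · rcases List.mem_cons.mp hp with rfl | hp
          · have hne : ¬ ((s₀ : Int) = e₁) := by omega
            rw [hget', hget']
            simp [hne, runLen]
          · have h1 := hrel1b' p hp
            have h2 := hle p (hRR₁R p hp)
            rw [hget', hget']
            rw [if_neg (by omega), if_neg (by omega), if_neg (by omega), if_neg (by omega)]
            exact hbound p (hRR₁R p hp)
    case _ =>
      rw [contains_eq_decide_pos, hcnt6]
  · -- extend the run on the left
    obtain ⟨RL₀, s₀, hRLeq, hs₀⟩ := hLex hL
    have hRdec : R = RL₀ ++ (s₀, pos - 1) :: RR := by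
      rw [← hsplit, hRLeq]; simp
    have hidx0 : RL₀.length + 1 = idx := by
      rw [← hlenRL, hRLeq]; simp
    have hpair' := hpair
    rw [hRdec, List.pairwise_append, List.pairwise_cons] at hpair'
    obtain ⟨hP0, ⟨hallRR, hPRR⟩, hcross⟩ := hpair'
    have hcross1 : ∀ a ∈ RL₀, a.2 + 1 < s₀ := fun a ha => by
      simpa using hcross a ha (s₀, pos - 1) (by simp)
    have hcrossb : ∀ a ∈ RL₀, ∀ b ∈ RR, a.2 + 1 < b.1 := fun a ha b hb => by
      simpa using hcross a ha b (by simp [hb])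
    have hmid1 : (s₀, pos - 1) ∈ R := by rw [hRdec]; simp
    have hb1' := hb1 hR
    have hRL₀R : ∀ p ∈ RL₀, p ∈ R := fun p hp => by rw [hRdec]; simp [hp]
    have hRRR : ∀ p ∈ RR, p ∈ R := hmemRR
    have hg2 : (R.map Prod.snd).getD (idx - 1) 0 = pos - 1 := by
      have hdec : R.map Prod.snd = RL₀.map Prod.snd ++ (pos - 1) :: RR.map Prod.snd := by
        rw [hRdec]; simp
      rw [hdec, show idx - 1 = (RL₀.map Prod.snd).length by simp; omega, getD_mid]
    have hsp' : R.map Prod.fst = (RL₀ ++ (s₀, pos) :: RR).map Prod.fst := by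
      rw [hRdec]; simp
    have hep' : (R.map Prod.snd).set (idx - 1) pos = (RL₀ ++ (s₀, pos) :: RR).map Prod.snd := by
      have hdec : R.map Prod.snd = RL₀.map Prod.snd ++ (pos - 1) :: RR.map Prod.snd := by
        rw [hRdec]; simp
      rw [hdec, show idx - 1 = (RL₀.map Prod.snd).length by simp; omega, set_mid]
      simp
    have hiva : (R.map runLen).getD (idx - 1) 0 = pos - s₀ := by
      have hdec : R.map runLen = RL₀.map runLen ++ (pos - s₀) :: RR.map runLen := by
        rw [hRdec]; simp [runLen]; ring
      rw [hdec, show idx - 1 = (RL₀.map runLen).length by simp; omega, getD_mid]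
    have hiv' : (R.map runLen).set (idx - 1) ((R.map runLen).getD (idx - 1) 0 + 1)
        = (RL₀ ++ (s₀, pos) :: RR).map runLen := by
      rw [hiva]
      have hdec : R.map runLen = RL₀.map runLen ++ (pos - s₀) :: RR.map runLen := by
        rw [hRdec]; simp [runLen]; ring
      rw [hdec, show idx - 1 = (RL₀.map runLen).length by simp; omega, set_mid]
      simp [runLen]
    have hgetL : lens.getD (pos - 1) 0 = pos - s₀ := by
      have h := (hbound _ hmid1).2
      simp only [runLen] at h
      rw [PySem.Dict.getD_eq_get?_getD, h]
      simp; ring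
    have hcontR : lens.contains (pos + 1) = false := by
      cases h : lens.contains (pos + 1) with
      | false => rfl
      | true => exact absurd (hkeys _ h) hR
    have hgetR0 : lens.getD (pos + 1) 0 = 0 := PySem.Dict.getD_of_not_contains lens 0 hcontR
    have hcnt6 : (if pos - s₀ + 1 = k then (if 0 < pos - s₀ ∧ pos - s₀ = k then cnt - 1 else cnt) + 1
        else (if 0 < pos - s₀ ∧ pos - s₀ = k then cnt - 1 else cnt))
        = (((RL₀ ++ (s₀, pos) :: RR).map runLen).count k : Int) := by
      rw [hcnt, hRdec]
      simp only [List.map_append, List.map_cons, List.count_append, List.count_cons, beq_iff_eq, runLen]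
      push_cast
      split_ifs <;> omega
    refine ⟨RL₀ ++ (s₀, pos) :: RR,
      (lens.insert s₀ (pos - s₀ + 1)).insert pos (pos - s₀ + 1),
      (if pos - s₀ + 1 = k then (if 0 < pos - s₀ ∧ pos - s₀ = k then cnt - 1 else cnt) + 1
       else (if 0 < pos - s₀ ∧ pos - s₀ = k then cnt - 1 else cnt)), ?_, ?_, ?_, ?_⟩
    case _ =>
      simp only [stepA]
      rw [← hidx]
      rw [if_neg (fun hc => hGR hR hc.2), if_pos ⟨by omega, by rw [hg2]; ring⟩]
      rw [hep', hiv']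
      rw [← hsp']
    case _ =>
      simp only [stepB]
      rw [hgetL, hgetR0]
      rw [if_neg (show ¬(0 < (0:Int) ∧ (0:Int) = k) by omega)]
      rw [show pos - (pos - s₀) = s₀ by ring, show pos + (0:Int) = pos by ring,
          show pos - s₀ + 1 + (0:Int) = pos - s₀ + 1 by ring]
    case _ =>
      refine ⟨?_, ?_, ?_, ?_, ?_, hcnt6⟩
      · intro p hp
        rcases List.mem_append.mp hp with hp | hp
        · exact hle p (hRL₀R p hp)
        · rcases List.mem_cons.mp hp with rfl | hp
          · simp; omega
          · exact hle p (hRRR p hp)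
      · rw [List.pairwise_append, List.pairwise_cons]
        refine ⟨hP0, ⟨fun b hb => by simpa using hb1' b hb, hPRR⟩, ?_⟩
        intro a ha b hb
        rcases List.mem_cons.mp hb with rfl | hb
        · simpa using hcross1 a ha
        · exact hcrossb a ha b hb
      · intro x
        rw [List.mem_append, List.mem_singleton, hmem x, hRdec]
        constructor
        · rintro (⟨p, hp, hx1, hx2⟩ | hxp)
          · rcases List.mem_append.mp hp with hp | hp
            · exact ⟨p, by simp [hp], hx1, hx2⟩
            · rcases List.mem_cons.mp hp with rfl | hp
              · exact ⟨(s₀, pos), by simp, by simpa using hx1, by simp at hx2 ⊢; omega⟩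
              · exact ⟨p, by simp [hp], hx1, hx2⟩
          · subst hxp
            exact ⟨(s₀, x), by simp, by simp; omega, by simp⟩
        · rintro ⟨p, hp, hx1, hx2⟩
          rcases List.mem_append.mp hp with hp | hp
          · exact Or.inl ⟨p, by simp [hp], hx1, hx2⟩
          · rcases List.mem_cons.mp hp with rfl | hp
            · simp only at hx1 hx2
              by_cases hxe : x = pos
              · exact Or.inr hxe
              · exact Or.inl ⟨(s₀, pos - 1), by simp, by simpa using hx1, by simp; omega⟩
            · exact Or.inl ⟨p, by simp [hp], hx1, hx2⟩
      · intro key hk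
        simp only [PySem.Dict.contains_insert, Bool.or_eq_true, beq_iff_eq] at hk
        rcases hk with hk1 | hk1 | hk
        · exact List.mem_append_right _ (by simp [hk1])
        · exact List.mem_append_left _ ((hmem _).mpr ⟨(s₀, pos - 1), hmid1, by simp [hk1], by simp [hk1]; omega⟩)
        · exact List.mem_append_left _ (hkeys _ hk)
      · have hget' : ∀ x : Int, ((lens.insert s₀ (pos - s₀ + 1)).insert pos (pos - s₀ + 1)).get? x
            = if x = pos then some (pos - s₀ + 1) else if x = s₀ then some (pos - s₀ + 1) else lens.get? x := by
          intro x
          rw [PySem.Dict.get?_insert, PySem.Dict.get?_insert]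
        intro p hp
        rcases List.mem_append.mp hp with hp | hp
        · have h1 := hcross1 p hp
          have h2 := hle p (hRL₀R p hp)
          rw [hget', hget']
          rw [if_neg (by omega), if_neg (by omega), if_neg (by omega), if_neg (by omega)]
          exact hbound p (hRL₀R p hp)
        · rcases List.mem_cons.mp hp with rfl | hp
          · have hne : ¬ (s₀ = pos) := by omega
            rw [hget', hget']
            simp [hne, runLen]
          · have h1 := hb1' p hp
            have h2 := hle p (hRRR p hp)
            rw [hget', hget']
            rw [if_neg (by omega), if_neg (by omega), if_neg (by omega), if_neg (by omega)]
            exact hbound p (hRRR p hp)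
    case _ =>
      rw [contains_eq_decide_pos, hcnt6]
  · -- extend the run on the right
    obtain ⟨e₁, RR₁, hRReq, he₁⟩ := hRex hR
    have hRdec : R = RL ++ (pos + 1, e₁) :: RR₁ := by
      rw [← hsplit, hRReq]
    have hpair' := hpair
    rw [hRdec, List.pairwise_append, List.pairwise_cons] at hpair'
    obtain ⟨hPL, ⟨hallRR₁, hPRR₁⟩, hcross⟩ := hpair'
    have hcrossb : ∀ a ∈ RL, ∀ b ∈ RR₁, a.2 + 1 < b.1 := fun a ha b hb => by
      simpa using hcross a ha b (by simp [hb])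
    have hallRR₁' : ∀ b ∈ RR₁, e₁ + 1 < b.1 := fun b hb => by simpa using hallRR₁ b hb
    have hmid2 : (pos + 1, e₁) ∈ R := by rw [hRdec]; simp
    have ha2' := ha2 hL
    have hRLR : ∀ p ∈ RL, p ∈ R := hmemRL
    have hRR₁R : ∀ p ∈ RR₁, p ∈ R := fun p hp => by rw [hRdec]; simp [hp]
    have hg3 : idx ≠ (R.map Prod.fst).length := by
      rw [hRdec]; simp; omega
    have hg4 : (R.map Prod.fst).getD idx 0 = pos + 1 := by
      have hdec : R.map Prod.fst = RL.map Prod.fst ++ (pos + 1) :: RR₁.map Prod.fst := by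
        rw [hRdec]; simp
      rw [hdec, show idx = (RL.map Prod.fst).length by simp [hlenRL], getD_mid]
    have hsp' : (R.map Prod.fst).set idx pos = (RL ++ (pos, e₁) :: RR₁).map Prod.fst := by
      have hdec : R.map Prod.fst = RL.map Prod.fst ++ (pos + 1) :: RR₁.map Prod.fst := by
        rw [hRdec]; simp
      rw [hdec, show idx = (RL.map Prod.fst).length by simp [hlenRL], set_mid]
      simp
    have hep' : R.map Prod.snd = (RL ++ (pos, e₁) :: RR₁).map Prod.snd := by
      rw [hRdec]; simp
    have hiva : (R.map runLen).getD idx 0 = e₁ - pos := by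
      have hdec : R.map runLen = RL.map runLen ++ (e₁ - pos) :: RR₁.map runLen := by
        rw [hRdec]; simp [runLen]; ring
      rw [hdec, show idx = (RL.map runLen).length by simp [hlenRL], getD_mid]
    have hiv' : (R.map runLen).set idx ((R.map runLen).getD idx 0 + 1)
        = (RL ++ (pos, e₁) :: RR₁).map runLen := by
      rw [hiva]
      have hdec : R.map runLen = RL.map runLen ++ (e₁ - pos) :: RR₁.map runLen := by
        rw [hRdec]; simp [runLen]; ring
      rw [hdec, show idx = (RL.map runLen).length by simp [hlenRL], set_mid]
      simp [runLen]
    have hcontL : lens.contains (pos - 1) = false := by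
      cases h : lens.contains (pos - 1) with
      | false => rfl
      | true => exact absurd (hkeys _ h) hL
    have hgetL0 : lens.getD (pos - 1) 0 = 0 := PySem.Dict.getD_of_not_contains lens 0 hcontL
    have hgetR : lens.getD (pos + 1) 0 = e₁ - pos := by
      have h := (hbound _ hmid2).1
      simp only [runLen] at h
      rw [PySem.Dict.getD_eq_get?_getD, h]
      simp; ring
    have hcnt6 : (if e₁ - pos + 1 = k then (if 0 < e₁ - pos ∧ e₁ - pos = k then cnt - 1 else cnt) + 1
        else (if 0 < e₁ - pos ∧ e₁ - pos = k then cnt - 1 else cnt))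
        = (((RL ++ (pos, e₁) :: RR₁).map runLen).count k : Int) := by
      rw [hcnt, hRdec]
      simp only [List.map_append, List.map_cons, List.count_append, List.count_cons, beq_iff_eq, runLen]
      push_cast
      split_ifs <;> omega
    refine ⟨RL ++ (pos, e₁) :: RR₁,
      (lens.insert pos (e₁ - pos + 1)).insert e₁ (e₁ - pos + 1),
      (if e₁ - pos + 1 = k then (if 0 < e₁ - pos ∧ e₁ - pos = k then cnt - 1 else cnt) + 1
        else (if 0 < e₁ - pos ∧ e₁ - pos = k then cnt - 1 else cnt)), ?_, ?_, ?_, ?_⟩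
    case _ =>
      simp only [stepA]
      rw [← hidx]
      rw [if_neg (fun hc => hGL hL hc.1), if_neg (hGL hL),
          if_pos ⟨hg3, by rw [hg4]; ring⟩]
      rw [hsp', hiv']
      rw [← hep']
    case _ =>
      simp only [stepB]
      rw [hgetL0, hgetR]
      rw [if_neg (show ¬(0 < (0:Int) ∧ (0:Int) = k) by omega)]
      rw [show pos - (0:Int) = pos by ring, show pos + (e₁ - pos) = e₁ by ring,
          show (0:Int) + 1 + (e₁ - pos) = e₁ - pos + 1 by ring]
    case _ =>
      refine ⟨?_, ?_, ?_, ?_, ?_, hcnt6⟩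
      · intro p hp
        rcases List.mem_append.mp hp with hp | hp
        · exact hle p (hRLR p hp)
        · rcases List.mem_cons.mp hp with rfl | hp
          · simp; omega
          · exact hle p (hRR₁R p hp)
      · rw [List.pairwise_append, List.pairwise_cons]
        refine ⟨hPL, ⟨fun b hb => by simpa using hallRR₁' b hb, hPRR₁⟩, ?_⟩
        intro a ha b hb
        rcases List.mem_cons.mp hb with rfl | hb
        · simpa using ha2' a ha
        · exact hcrossb a ha b hb
      · intro x
        rw [List.mem_append, List.mem_singleton, hmem x, hRdec]
        constructor
        · rintro (⟨p, hp, hx1, hx2⟩ | hxp)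
          · rcases List.mem_append.mp hp with hp | hp
            · exact ⟨p, by simp [hp], hx1, hx2⟩
            · rcases List.mem_cons.mp hp with rfl | hp
              · exact ⟨(pos, e₁), by simp, by simp at hx1 ⊢; omega, by simpa using hx2⟩
              · exact ⟨p, by simp [hp], hx1, hx2⟩
          · subst hxp
            exact ⟨(x, e₁), by simp, by simp, by simp; omega⟩
        · rintro ⟨p, hp, hx1, hx2⟩
          rcases List.mem_append.mp hp with hp | hp
          · exact Or.inl ⟨p, by simp [hp], hx1, hx2⟩
          · rcases List.mem_cons.mp hp with rfl | hp
            · simp only at hx1 hx2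
              by_cases hxe : x = pos
              · exact Or.inr hxe
              · exact Or.inl ⟨(pos + 1, e₁), by simp, by simp; omega, by simpa using hx2⟩
            · exact Or.inl ⟨p, by simp [hp], hx1, hx2⟩
      · intro key hk
        simp only [PySem.Dict.contains_insert, Bool.or_eq_true, beq_iff_eq] at hk
        rcases hk with hk1 | hk1 | hk
        · exact List.mem_append_left _ ((hmem _).mpr ⟨(pos + 1, e₁), hmid2, by simp [hk1]; omega, by simp [hk1]⟩)
        · exact List.mem_append_right _ (by simp [hk1])
        · exact List.mem_append_left _ (hkeys _ hk)
      · have hget' : ∀ x : Int, ((lens.insert pos (e₁ - pos + 1)).insert e₁ (e₁ - pos + 1)).get? x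
            = if x = e₁ then some (e₁ - pos + 1) else if x = pos then some (e₁ - pos + 1) else lens.get? x := by
          intro x
          rw [PySem.Dict.get?_insert, PySem.Dict.get?_insert]
        intro p hp
        rcases List.mem_append.mp hp with hp | hp
        · have h1 := ha2' p hp
          have h2 := hle p (hRLR p hp)
          rw [hget', hget']
          rw [if_neg (by omega), if_neg (by omega), if_neg (by omega), if_neg (by omega)]
          exact hbound p (hRLR p hp)
        · rcases List.mem_cons.mp hp with rfl | hp
          · have hne : ¬ ((pos : Int) = e₁) := by omega
            rw [hget', hget']
            simp [hne, runLen]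
          · have h1 := hallRR₁' p hp
            have h2 := hle p (hRR₁R p hp)
            rw [hget', hget']
            rw [if_neg (by omega), if_neg (by omega), if_neg (by omega), if_neg (by omega)]
            exact hbound p (hRR₁R p hp)
    case _ =>
      rw [contains_eq_decide_pos, hcnt6]
  · -- isolated new run
    have hRdec : R = RL ++ RR := hsplit.symm
    have hpair' := hpair
    rw [hRdec, List.pairwise_append] at hpair'
    obtain ⟨hPL, hPR, hcross⟩ := hpair'
    have ha2' := ha2 hL
    have hb1' := hb1 hR
    have hRLR : ∀ p ∈ RL, p ∈ R := hmemRL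
    have hRRR : ∀ p ∈ RR, p ∈ R := hmemRR
    have hsp' : (R.map Prod.fst).insertIdx idx pos = (RL ++ (pos, pos) :: RR).map Prod.fst := by
      have hdec : R.map Prod.fst = RL.map Prod.fst ++ RR.map Prod.fst := by
        rw [hRdec]; simp
      rw [hdec, show idx = (RL.map Prod.fst).length by simp [hlenRL], insert_mid]
      simp
    have hep' : (R.map Prod.snd).insertIdx idx pos = (RL ++ (pos, pos) :: RR).map Prod.snd := by
      have hdec : R.map Prod.snd = RL.map Prod.snd ++ RR.map Prod.snd := by
        rw [hRdec]; simp
      rw [hdec, show idx = (RL.map Prod.snd).length by simp [hlenRL], insert_mid]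
      simp
    have hiv' : (R.map runLen).insertIdx idx 1 = (RL ++ (pos, pos) :: RR).map runLen := by
      have hdec : R.map runLen = RL.map runLen ++ RR.map runLen := by
        rw [hRdec]; simp
      rw [hdec, show idx = (RL.map runLen).length by simp [hlenRL], insert_mid]
      simp [runLen]
    have hcontL : lens.contains (pos - 1) = false := by
      cases h : lens.contains (pos - 1) with
      | false => rfl
      | true => exact absurd (hkeys _ h) hL
    have hgetL0 : lens.getD (pos - 1) 0 = 0 := PySem.Dict.getD_of_not_contains lens 0 hcontL
    have hcontR : lens.contains (pos + 1) = false := by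
      cases h : lens.contains (pos + 1) with
      | false => rfl
      | true => exact absurd (hkeys _ h) hR
    have hgetR0 : lens.getD (pos + 1) 0 = 0 := PySem.Dict.getD_of_not_contains lens 0 hcontR
    have hcnt6 : (if (1 : Int) = k then cnt + 1 else cnt)
        = (((RL ++ (pos, pos) :: RR).map runLen).count k : Int) := by
      rw [hcnt, hRdec]
      simp only [List.map_append, List.map_cons, List.count_append, List.count_cons, beq_iff_eq, runLen]
      push_cast
      split_ifs <;> omega
    refine ⟨RL ++ (pos, pos) :: RR,
      (lens.insert pos 1).insert pos 1,
      (if (1 : Int) = k then cnt + 1 else cnt), ?_, ?_, ?_, ?_⟩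
    case _ =>
      simp only [stepA]
      rw [← hidx]
      rw [if_neg (fun hc => hGL hL hc.1), if_neg (hGL hL), if_neg (hGR hR)]
      rw [hsp', hep', hiv']
    case _ =>
      simp only [stepB]
      rw [hgetL0, hgetR0]
      rw [if_neg (show ¬(0 < (0:Int) ∧ (0:Int) = k) by omega),
          if_neg (show ¬(0 < (0:Int) ∧ (0:Int) = k) by omega)]
      rw [show pos - (0:Int) = pos by ring, show pos + (0:Int) = pos by ring,
          show (0:Int) + 1 + 0 = 1 by ring]
    case _ =>
      refine ⟨?_, ?_, ?_, ?_, ?_, hcnt6⟩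
      · intro p hp
        rcases List.mem_append.mp hp with hp | hp
        · exact hle p (hRLR p hp)
        · rcases List.mem_cons.mp hp with rfl | hp
          · simp
          · exact hle p (hRRR p hp)
      · rw [List.pairwise_append, List.pairwise_cons]
        refine ⟨hPL, ⟨fun b hb => by simpa using hb1' b hb, hPR⟩, ?_⟩
        intro a ha b hb
        rcases List.mem_cons.mp hb with rfl | hb
        · simpa using ha2' a ha
        · exact hcross a ha b hb
      · intro x
        rw [List.mem_append, List.mem_singleton, hmem x, hRdec]
        constructor
        · rintro (⟨p, hp, hx1, hx2⟩ | hxp)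
          · rcases List.mem_append.mp hp with hp | hp
            · exact ⟨p, by simp [hp], hx1, hx2⟩
            · exact ⟨p, by simp [hp], hx1, hx2⟩
          · subst hxp
            exact ⟨(x, x), by simp, by simp, by simp⟩
        · rintro ⟨p, hp, hx1, hx2⟩
          rcases List.mem_append.mp hp with hp | hp
          · exact Or.inl ⟨p, by simp [hp], hx1, hx2⟩
          · rcases List.mem_cons.mp hp with rfl | hp
            · simp only at hx1 hx2
              exact Or.inr (by omega)
            · exact Or.inl ⟨p, by simp [hp], hx1, hx2⟩
      · intro key hk
        simp only [PySem.Dict.contains_insert, Bool.or_eq_true, beq_iff_eq] at hk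
        rcases hk with hk1 | hk1 | hk
        · exact List.mem_append_right _ (by simp [hk1])
        · exact List.mem_append_right _ (by simp [hk1])
        · exact List.mem_append_left _ (hkeys _ hk)
      · have hget' : ∀ x : Int, ((lens.insert pos 1).insert pos 1).get? x
            = if x = pos then some 1 else if x = pos then some 1 else lens.get? x := by
          intro x
          rw [PySem.Dict.get?_insert, PySem.Dict.get?_insert]
        intro p hp
        rcases List.mem_append.mp hp with hp | hp
        · have h1 := ha2' p hp
          have h2 := hle p (hRLR p hp)
          rw [hget', hget']
          rw [if_neg (by omega), if_neg (by omega), if_neg (by omega), if_neg (by omega)]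
          exact hbound p (hRLR p hp)
        · rcases List.mem_cons.mp hp with rfl | hp
          · rw [hget']
            simp [runLen]
          · have h1 := hb1' p hp
            have h2 := hle p (hRRR p hp)
            rw [hget', hget']
            rw [if_neg (by omega), if_neg (by omega), if_neg (by omega), if_neg (by omega)]
            exact hbound p (hRRR p hp)
    case _ =>
      rw [contains_eq_decide_pos, hcnt6]

def ansOf (sl : List Bool) : Int :=
  (PySem.List.enumerate sl 1).foldl (fun a p => if p.2 then p.1 else a) (-1)

lemma ansOf_append_singleton (sl : List Bool) (b : Bool) :
    ansOf (sl ++ [b]) = if b then (sl.length : Int) + 1 else ansOf sl := by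
  simp [ansOf, PySem.List.enumerate_append, List.foldl_append, PySem.List.enumerate_cons]
  cases b <;> simp [add_comm]

lemma loop_sim (k : Int) (rest : List Int) : ∀ (done : List Int) (R : List (Int × Int))
    (lens : PySem.Dict Int Int) (cnt : Int) (sl : List Bool),
    RInv k done R lens cnt → (∀ p ∈ rest, p ∉ done) → rest.Nodup →
    (rest.foldl (stepB k) (lens, cnt, ansOf sl, (sl.length : Int))).2.2.1
      = ansOf (rest.foldl (stepA k) (R.map Prod.fst, R.map Prod.snd, R.map runLen, sl)).2.2.2 := by
  induction rest with
  | nil => intro done R lens cnt sl hInv hfresh hnd; rfl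
  | cons pos rest ih =>
    intro done R lens cnt sl hInv hfresh hnd
    obtain ⟨R', lens', cnt', hA, hB, hInv', hflag⟩ :=
      step_sim k pos done R lens cnt (ansOf sl) (sl.length : Int) sl hInv (hfresh pos (by simp))
    simp only [List.foldl_cons]
    rw [hA, hB]
    have hans : (if 0 < cnt' then (sl.length : Int) + 1 else ansOf sl)
        = ansOf (sl ++ [(R'.map runLen).contains k]) := by
      rw [ansOf_append_singleton, hflag]
      by_cases h : 0 < cnt' <;> simp [h]
    have hday : (sl.length : Int) + 1 = ((sl ++ [(R'.map runLen).contains k]).length : Int) := by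
      simp
    rw [hans, hday]
    refine ih (done ++ [pos]) R' lens' cnt' (sl ++ [(R'.map runLen).contains k]) hInv' ?_ hnd.of_cons
    intro p hp hmem'
    rcases List.mem_append.mp hmem' with h' | h'
    · exact hfresh p (List.mem_cons_of_mem _ hp) h'
    · rw [List.mem_singleton] at h'
      subst h'
      exact (List.nodup_cons.mp hnd).1 hp

lemma stepA_empty (k f0 : Int) : stepA k ([], [], [], []) f0 = ([f0], [f0], [1], [k == 1]) := by
  simp only [stepA]
  norm_num
  rw [show (k == 1) = decide (k = 1) by rfl]

lemma hInv0 (k : Int) : RInv k [] [] PySem.Dict.empty 0 := by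
  refine ⟨by simp, by simp, by simp, ?_, by simp, by simp⟩
  intro key hk
  rw [PySem.Dict.contains_empty] at hk
  exact absurd hk (by simp)

lemma max?_append_singleton_of_le (xs : List Int) (y : Int) (h : ∀ x ∈ xs, x ≤ y) :
    PySem.List.max? (xs ++ [y]) (fun x => x) = some y := by
  cases xs with
  | nil => simp [PySem.List.max?_id_cons]
  | cons x t =>
    rw [List.cons_append, PySem.List.max?_id_cons, List.foldl_append]
    have hm : PySem.List.max? (x :: t) (fun x => x) = some (t.foldl max x) :=
      PySem.List.max?_id_cons x t
    have hmem := PySem.List.max?_mem hm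
    have hle := h _ hmem
    simp only [List.foldl_cons, List.foldl_nil]
    rw [max_eq_right hle]

lemma final_aux (sl : List Bool) :
    (∀ x ∈ ((PySem.List.enumerate sl).filter (fun p => p.2)).map (fun p => p.1 + 1), x ≤ (sl.length : Int)) ∧
    (match PySem.List.max?
        (((PySem.List.enumerate sl).filter (fun p => p.2)).map (fun p => p.1 + 1))
        (fun x => x) with
      | none => -1
      | some d => d) = ansOf sl := by
  induction sl using List.reverseRecOn with
  | nil => simp [PySem.List.max?, ansOf]
  | append_singleton sl b ih =>
    obtain ⟨hb, he⟩ := ih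
    rw [ansOf_append_singleton]
    have hd : ((PySem.List.enumerate (sl ++ [b])).filter (fun p => p.2)).map (fun p => p.1 + 1)
        = (((PySem.List.enumerate sl).filter (fun p => p.2)).map (fun p => p.1 + 1))
          ++ (if b then [(sl.length : Int) + 1] else []) := by
      cases b <;> simp [PySem.List.enumerate_append, PySem.List.enumerate_cons]
    rw [hd]
    cases b with
    | false =>
      simp only [Bool.false_eq_true, if_false, List.append_nil]
      refine ⟨fun x hx => ?_, he⟩
      have := hb x hx
      simp only [List.length_append, List.length_cons, List.length_nil]
      push_cast; omega
    | true =>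
      simp only [if_true]
      constructor
      · intro x hx
        simp only [List.mem_append, List.mem_singleton] at hx
        simp only [List.length_append, List.length_cons, List.length_nil]
        rcases hx with hx | hx
        · have := hb x hx; push_cast; omega
        · push_cast; omega
      · rw [max?_append_singleton_of_le _ _ (fun x hx => le_trans (hb x hx) (by omega))]


theorem equiv_main (flowers : List Int) (k : Int) (h1 : flowers ≠ []) (h2 : flowers.Nodup) :
    kBloomingSlots flowers k = kBloomingSlots_alt flowers k := by
  obtain ⟨f0, rest, rfl⟩ := List.exists_cons_of_ne_nil h1
  have hloop := loop_sim k (f0 :: rest) [] [] PySem.Dict.empty 0 [] (hInv0 k)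
    (by simp) h2
  have hB : kBloomingSlots_alt (f0 :: rest) k
      = ((f0 :: rest).foldl (stepB k) (PySem.Dict.empty, 0, ansOf [], ((([]:List Bool)).length : Int))).2.2.1 := rfl
  have hA0 : (f0 :: rest).foldl (stepA k) (([]:List (Int×Int)).map Prod.fst,
      ([]:List (Int×Int)).map Prod.snd, ([]:List (Int×Int)).map runLen, ([]:List Bool))
      = rest.foldl (stepA k) ([f0], [f0], [1], [k == 1]) := by
    simp only [List.map_nil, List.foldl_cons]
    rw [stepA_empty]
  rw [hB, hloop, hA0]
  show kBloomingSlots (f0 :: rest) k = _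
  simp only [kBloomingSlots]
  exact (final_aux _).2

-- ===== VERDICT (by name: the statement is the Claim_ definition above) =====
theorem kBloomingSlots_spec : Claim_equal_kBloomingSlots := by
  intro flowers k hdom hpre
  unfold Spec_kBloomingSlots
  exact equiv_main flowers k hpre.1 hpre.2
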